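-- pv_equiv track=rewrite | github.com/Ewanjohndennis/RealTimeMarketIntelli | agents/competitor_agent.py | get_preset_competitors
-- ===== SOURCE A (Python) =====
-- COMPETITOR_GROUPS = [
--     ["Apple", "Samsung", "Google", "Xiaomi", "OnePlus"],
--     ["Nike", "Adidas", "Puma", "New Balance", "Reebok"],
--     ["Microsoft", "Google", "Apple", "Amazon", "Meta"],
--     ["Tesla", "Rivian", "Ford", "GM", "BYD"],
--     ["Netflix", "Disney", "Amazon", "HBO", "Apple"],
--     ["Coca Cola", "Pepsi", "Red Bull", "Monster", "Sprite"],
--     ["Intel", "AMD", "Nvidia", "Qualcomm", "Apple"],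
--     ["Infosys", "Wipro", "TCS", "HCL", "Accenture"],
-- ]
--
-- def get_preset_competitors(company: str) -> list[str]:
--     name = company.strip().lower()
--     for group in COMPETITOR_GROUPS:
--         group_lower = [c.lower() for c in group]
--         if name in group_lower:
--             idx = group_lower.index(name)
--             return [c for c in group if c.lower() != name]
--     return []
-- ===== SOURCE B (Python) =====
-- COMPETITOR_GROUPS = [
--     ["Apple", "Samsung", "Google", "Xiaomi", "OnePlus"],
--     ["Nike", "Adidas", "Puma", "New Balance", "Reebok"],
--     ["Microsoft", "Google", "Apple", "Amazon", "Meta"],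
--     ["Tesla", "Rivian", "Ford", "GM", "BYD"],
--     ["Netflix", "Disney", "Amazon", "HBO", "Apple"],
--     ["Coca Cola", "Pepsi", "Red Bull", "Monster", "Sprite"],
--     ["Intel", "AMD", "Nvidia", "Qualcomm", "Apple"],
--     ["Infosys", "Wipro", "TCS", "HCL", "Accenture"],
-- ]
--
-- # One-time index: lowercased name -> competitor list; first group wins.
-- _LOOKUP = {}
-- for _group in COMPETITOR_GROUPS:
--     for _c in _group:
--         _key = _c.lower()
--         if _key not in _LOOKUP:
--             _LOOKUP[_key] = [x for x in _group if x.lower() != _key]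
--
-- def get_preset_competitors(company: str) -> list[str]:
--     return _LOOKUP.get(company.strip().lower(), [])
-- ===== Notes on version B (the rewrite author's own statement) =====
-- stated objective: simpler
-- what changed: Replaces the per-call scan over COMPETITOR_GROUPS (lowering each group and testing membership) with a module-level dict built once mapping each lowercased name to its competitor list (first group wins), so the function body is a single dict lookup.
import Mathlib
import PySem

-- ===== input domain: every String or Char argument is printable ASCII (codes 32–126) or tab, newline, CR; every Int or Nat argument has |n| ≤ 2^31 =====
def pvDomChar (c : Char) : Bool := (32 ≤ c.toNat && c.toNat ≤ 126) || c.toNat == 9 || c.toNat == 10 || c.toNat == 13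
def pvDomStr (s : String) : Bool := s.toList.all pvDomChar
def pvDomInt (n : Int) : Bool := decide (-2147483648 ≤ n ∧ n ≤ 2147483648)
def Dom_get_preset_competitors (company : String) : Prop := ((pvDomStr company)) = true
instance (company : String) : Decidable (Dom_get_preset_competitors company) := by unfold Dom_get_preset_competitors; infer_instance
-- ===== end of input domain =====

-- B replaces A's per-call scan of COMPETITOR_GROUPS by a dict index built once
-- (lowercased name -> competitor list, first group wins); objective: simpler.

def pvCompetitorGroups : List (List String) := [
  ["Apple", "Samsung", "Google", "Xiaomi", "OnePlus"],
  ["Nike", "Adidas", "Puma", "New Balance", "Reebok"],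
  ["Microsoft", "Google", "Apple", "Amazon", "Meta"],
  ["Tesla", "Rivian", "Ford", "GM", "BYD"],
  ["Netflix", "Disney", "Amazon", "HBO", "Apple"],
  ["Coca Cola", "Pepsi", "Red Bull", "Monster", "Sprite"],
  ["Intel", "AMD", "Nvidia", "Qualcomm", "Apple"],
  ["Infosys", "Wipro", "TCS", "HCL", "Accenture"]]

-- ===== PORT A =====
-- literal port of A's loop over COMPETITOR_GROUPS
def pvScanA : List (List String) → String → List String
  | [], _ => []
  | g :: gs, name =>
    let group_lower := g.map PySem.Str.lower
    if name ∈ group_lower then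
      let _idx := PySem.List.index? group_lower name   -- A computes idx but never uses it
      g.filter (fun c => PySem.Str.lower c != name)
    else pvScanA gs name

def get_preset_competitors (company : String) : List String :=
  pvScanA pvCompetitorGroups (PySem.Str.lower (PySem.Str.strip company))

-- ===== PORT B =====
-- module-level build of the lookup dict: for each group, for each name, first insertion wins
def pvInsertGroup (d : PySem.Dict String (List String)) (g : List String) :
    PySem.Dict String (List String) :=
  g.foldl (fun d c =>
    let key := PySem.Str.lower c
    if d.contains key then d
    else d.insert key (g.filter (fun x => PySem.Str.lower x != key))) d

def pvLookup : PySem.Dict String (List String) :=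
  pvCompetitorGroups.foldl pvInsertGroup PySem.Dict.empty

def get_preset_competitors_alt (company : String) : List String :=
  pvLookup.getD (PySem.Str.lower (PySem.Str.strip company)) []

-- ===== PRECONDITION & SPEC =====
def Spec_get_preset_competitors (company : String) (out : List String) : Prop := out = get_preset_competitors_alt company
instance (company : String) (out : List String) : Decidable (Spec_get_preset_competitors company out) := by unfold Spec_get_preset_competitors; infer_instance

-- ===== CLAIM (what is proved, stated in full; the proofs are below) =====
def Claim_equal_get_preset_competitors : Prop := ∀ (company : String), Dom_get_preset_competitors company → Spec_get_preset_competitors company (get_preset_competitors company)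

-- ===== LEMMAS AND PROOFS =====

-- once a key is present, the group-insertion loop never changes its value
theorem pvInner_of_some (g : List String) (v : List String) :
    ∀ (l : List String) (d : PySem.Dict String (List String)) (name : String),
      d.get? name = some v →
      (l.foldl (fun d c =>
        let key := PySem.Str.lower c
        if d.contains key then d
        else d.insert key (g.filter (fun x => PySem.Str.lower x != key))) d).get? name = some v := by
  intro l
  induction l with
  | nil => intro d name h; simpa using h
  | cons c cs ih =>
    intro d name h
    simp only [List.foldl_cons]
    by_cases hc : d.contains (PySem.Str.lower c)
    · rw [if_pos hc]; exact ih d name h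
    · rw [if_neg hc]
      apply ih
      have hne : name ≠ PySem.Str.lower c := by
        intro he
        rw [PySem.Dict.contains_eq_isSome_get?] at hc
        rw [← he, h] at hc
        simp at hc
      rw [PySem.Dict.get?_insert_of_ne _ _ hne]
      exact h

-- a fresh key comes out of the group-insertion loop with A's filtered value iff it occurs in the group
theorem pvInner_of_none (g : List String) :
    ∀ (l : List String) (d : PySem.Dict String (List String)) (name : String),
      d.get? name = none →
      (l.foldl (fun d c =>
        let key := PySem.Str.lower c
        if d.contains key then d
        else d.insert key (g.filter (fun x => PySem.Str.lower x != key))) d).get? name =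
        (if name ∈ l.map PySem.Str.lower then
           some (g.filter (fun x => PySem.Str.lower x != name)) else none) := by
  intro l
  induction l with
  | nil => intro d name h; simpa using h
  | cons c cs ih =>
    intro d name h
    simp only [List.foldl_cons, List.map_cons, List.mem_cons]
    by_cases hc : d.contains (PySem.Str.lower c)
    · rw [if_pos hc]
      have hne : name ≠ PySem.Str.lower c := by
        intro he
        rw [PySem.Dict.contains_eq_isSome_get?] at hc
        rw [← he, h] at hc
        simp at hc
      rw [ih d name h]
      simp [hne]
    · rw [if_neg hc]
      by_cases he : name = PySem.Str.lower c
      · subst he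
        rw [pvInner_of_some g _ cs _ _ (PySem.Dict.get?_insert_self _ _ _)]
        simp
      · have h' : (d.insert (PySem.Str.lower c)
            (g.filter (fun x => PySem.Str.lower x != PySem.Str.lower c))).get? name = none := by
          rw [PySem.Dict.get?_insert_of_ne _ _ he]; exact h
        rw [ih _ name h']
        simp [he]

-- folding further groups never changes an already-present key's value
theorem pvOuter_of_some (v : List String) :
    ∀ (gs : List (List String)) (d : PySem.Dict String (List String)) (name : String),
      d.get? name = some v →
      (gs.foldl pvInsertGroup d).getD name [] = v := by
  intro gs
  induction gs with
  | nil => intro d name h; simp [PySem.Dict.getD_eq_get?_getD, h]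
  | cons g gs ih =>
    intro d name h
    simp only [List.foldl_cons]
    exact ih _ name (pvInner_of_some g v g d name h)

-- main invariant: the dict built from the remaining groups answers exactly what A's scan returns
theorem pvOuter_of_none :
    ∀ (gs : List (List String)) (d : PySem.Dict String (List String)) (name : String),
      d.get? name = none →
      (gs.foldl pvInsertGroup d).getD name [] = pvScanA gs name := by
  intro gs
  induction gs with
  | nil => intro d name h; simp [PySem.Dict.getD_eq_get?_getD, h, pvScanA]
  | cons g gs ih =>
    intro d name h
    simp only [List.foldl_cons]
    by_cases hm : name ∈ g.map PySem.Str.lower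
    · have hs : (pvInsertGroup d g).get? name =
          some (g.filter (fun x => PySem.Str.lower x != name)) := by
        rw [pvInsertGroup, pvInner_of_none g g d name h]; simp [hm]
      rw [pvOuter_of_some _ gs _ name hs]
      simp [pvScanA, hm]
    · have hs : (pvInsertGroup d g).get? name = none := by
        rw [pvInsertGroup, pvInner_of_none g g d name h]; simp [hm]
      rw [ih _ name hs]
      simp [pvScanA, hm]

-- ===== VERDICT (by name: the statement is the Claim_ definition above) =====
theorem get_preset_competitors_spec : Claim_equal_get_preset_competitors := by
  intro company _
  unfold Spec_get_preset_competitors get_preset_competitors get_preset_competitors_alt pvLookup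
  exact (pvOuter_of_none pvCompetitorGroups PySem.Dict.empty _ (PySem.Dict.get?_empty _)).symm
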